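-- pv_equiv track=rewrite | github.com/TheGhostOfTomJoad/programmierung_TGI11 | arbeitsblätter/aufgabensammlung_überarbeitet/sections/13_strings_als_container/snippet-strings_als_container.py | move_vowels
-- ===== SOURCE A (Python) =====
-- def move_vowels(input):
--     not_vowels = ""
--     vowels =""
--     for char in input:
--         if char == "a" or char == "e" or char == "i" or char == "o" or char == "u":
--             vowels = vowels + char
--         else:
--             not_vowels = not_vowels + char
--     return not_vowels + vowels
-- ===== SOURCE B (Python) =====
-- def move_vowels(input):
--     consonant_part = "".join(c for c in input if c not in "aeiou")
--     vowel_part = "".join(c for c in input if c in "aeiou")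
--     return consonant_part + vowel_part
-- ===== Notes on version B (the rewrite author's own statement) =====
-- stated objective: idiomatic
-- what changed: Replaced the single pass maintaining two string accumulators with two independent filtering passes (join over generator expressions) concatenated at the end.
import Mathlib
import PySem

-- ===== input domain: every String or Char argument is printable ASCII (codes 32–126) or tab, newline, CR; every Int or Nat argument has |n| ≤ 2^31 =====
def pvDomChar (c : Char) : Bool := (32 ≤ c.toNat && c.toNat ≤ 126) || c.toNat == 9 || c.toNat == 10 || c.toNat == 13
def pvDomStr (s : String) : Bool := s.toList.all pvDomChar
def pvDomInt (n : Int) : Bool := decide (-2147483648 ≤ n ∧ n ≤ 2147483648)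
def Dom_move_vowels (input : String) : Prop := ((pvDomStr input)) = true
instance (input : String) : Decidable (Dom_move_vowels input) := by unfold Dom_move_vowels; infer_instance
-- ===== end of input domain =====

-- B changes the decomposition: two independent filtering passes instead of one pass with two accumulators (idiomatic; not faster).

-- ===== PORT A =====
-- Single pass: fold over the characters, appending each to the vowel or non-vowel accumulator.
def move_vowels (input : String) : String :=
  let p := input.toList.foldl
    (fun (acc : List Char × List Char) char =>
      if char = 'a' ∨ char = 'e' ∨ char = 'i' ∨ char = 'o' ∨ char = 'u' then
        (acc.1, acc.2 ++ [char])
      else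
        (acc.1 ++ [char], acc.2))
    ([], [])
  String.ofList (p.1 ++ p.2)

-- ===== PORT B =====
-- Two passes: filter out vowels, then keep only vowels ('c in "aeiou"' via PySem.Chars.isIn), concatenate.
def move_vowels_alt (input : String) : String :=
  let consonant_part := input.toList.filter (fun c => ¬ PySem.Chars.isIn [c] "aeiou".toList)
  let vowel_part := input.toList.filter (fun c => PySem.Chars.isIn [c] "aeiou".toList)
  String.ofList (consonant_part ++ vowel_part)

-- ===== PRECONDITION & SPEC =====
def Spec_move_vowels (input : String) (out : String) : Prop := out = move_vowels_alt input
instance (input : String) (out : String) : Decidable (Spec_move_vowels input out) := by unfold Spec_move_vowels; infer_instance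

-- ===== CLAIM (what is proved, stated in full; the proofs are below) =====
def Claim_equal_move_vowels : Prop := ∀ (input : String), Dom_move_vowels input → Spec_move_vowels input (move_vowels input)

-- ===== LEMMAS AND PROOFS =====

theorem mv_isVowel_iff (c : Char) :
    PySem.Chars.isIn [c] "aeiou".toList = true ↔
      (c = 'a' ∨ c = 'e' ∨ c = 'i' ∨ c = 'o' ∨ c = 'u') := by
  rw [PySem.Chars.isIn_iff_infix]
  constructor <;> intro h
  · have hm : c ∈ "aeiou".toList := h.mem (by simp)
    simpa using hm
  · rcases h with h | h | h | h | h <;> subst h <;> decide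

theorem mv_fold_invariant (l nv v : List Char) :
    l.foldl
      (fun (acc : List Char × List Char) char =>
        if char = 'a' ∨ char = 'e' ∨ char = 'i' ∨ char = 'o' ∨ char = 'u' then
          (acc.1, acc.2 ++ [char])
        else
          (acc.1 ++ [char], acc.2))
      (nv, v)
    = (nv ++ l.filter (fun c => ¬ PySem.Chars.isIn [c] "aeiou".toList),
       v ++ l.filter (fun c => PySem.Chars.isIn [c] "aeiou".toList)) := by
  induction l generalizing nv v with
  | nil => simp
  | cons c l ih =>
    by_cases h : (c = 'a' ∨ c = 'e' ∨ c = 'i' ∨ c = 'o' ∨ c = 'u')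
    · have hv : PySem.Chars.isIn [c] ['a','e','i','o','u'] = true := (mv_isVowel_iff c).mpr h
      simp [List.foldl_cons, if_pos h, ih, hv]  -- hv picks the filter branch
    · have hv : PySem.Chars.isIn [c] ['a','e','i','o','u'] = false := by
        rcases Bool.eq_false_or_eq_true (PySem.Chars.isIn [c] "aeiou".toList) with h' | h'
        · exact absurd ((mv_isVowel_iff c).mp h') h
        · exact h'
      simp [List.foldl_cons, if_neg h, ih, hv]  -- hv picks the filter branch

-- ===== VERDICT (by name: the statement is the Claim_ definition above) =====
theorem move_vowels_spec : Claim_equal_move_vowels := by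
  intro input _
  show move_vowels input = move_vowels_alt input
  simp [move_vowels, move_vowels_alt, mv_fold_invariant]
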